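-- pv_equiv track=rewrite | github.com/Swoop-Adventures/csv-migration-command-line-tool | customizable_mapping.py | parse_bed_configurations
-- ===== SOURCE A (Python) =====
-- def parse_bed_configurations(value):
--     options = {
--         "single": "single",
--         "double": "double",
--         "twin": "twin",
--         "triple": "triple",
--         "quad": "quad",
--         "bunk bed": "bunkBed",
--         "bunkbed": "bunkBed",  # handle variations
--         "cabin": "cabin"
--     }
--     result = {v: False for v in options.values()}
--
--     if isinstance(value, str):
--         for part in value.split(","):
--             part_clean = part.strip().lower()
--             for k, v in options.items():
--                 if k in part_clean:
--                     result[v] = True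
--     return result
-- ===== SOURCE B (Python) =====
-- def parse_bed_configurations(value):
--     low = value.lower() if isinstance(value, str) else ""
--
--     def hit(*keywords):
--         return any(k in low for k in keywords)
--
--     return {
--         "single": hit("single"),
--         "double": hit("double"),
--         "twin": hit("twin"),
--         "triple": hit("triple"),
--         "quad": hit("quad"),
--         "bunkBed": hit("bunk bed", "bunkbed"),
--         "cabin": hit("cabin"),
--     }
-- ===== Notes on version B (the rewrite author's own statement) =====
-- stated objective: simpler
-- what changed: B drops the comma-split, the per-part strip/lower and the nested dict-mutating loops entirely: it lowercases the whole string once and builds the result dict directly from one whole-string membership test per keyword (keywords contain no comma and have non-whitespace endpoints, so whole-string membership equals per-part membership after strip).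
import Mathlib
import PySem

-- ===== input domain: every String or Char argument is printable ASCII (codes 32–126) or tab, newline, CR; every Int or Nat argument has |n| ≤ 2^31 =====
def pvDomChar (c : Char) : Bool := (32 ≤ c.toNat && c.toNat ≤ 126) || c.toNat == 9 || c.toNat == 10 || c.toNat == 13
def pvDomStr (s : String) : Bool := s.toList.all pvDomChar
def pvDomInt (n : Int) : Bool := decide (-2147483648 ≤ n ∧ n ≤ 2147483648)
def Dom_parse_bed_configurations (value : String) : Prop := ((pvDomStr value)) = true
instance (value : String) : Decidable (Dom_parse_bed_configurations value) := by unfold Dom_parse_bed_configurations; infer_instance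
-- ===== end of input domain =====

-- B replaces A's comma-split / per-part strip / nested dict-mutating loops by one lowercasing of the
-- whole string and one direct membership test per keyword (objective: simpler; same exact results).

-- ===== PORT A =====
-- the `options` dict of A, as its insertion-ordered item list
def pvOptions : List (String × String) :=
  [("single", "single"), ("double", "double"), ("twin", "twin"), ("triple", "triple"),
   ("quad", "quad"), ("bunk bed", "bunkBed"), ("bunkbed", "bunkBed"), ("cabin", "cabin")]

def parse_bed_configurations (value : String) : List (String × Bool) :=
  -- result = {v: False for v in options.values()}
  let result : PySem.Dict String Bool :=
    (pvOptions.map Prod.snd).foldl (fun d v => d.insert v false) PySem.Dict.empty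
  -- value.split(","): the separator "," is nonempty, so Str.split? is `some` and `.getD []` is exact
  let parts := (PySem.Str.split? value ",").getD []
  let result := parts.foldl (fun d part =>
      let part_clean := PySem.Str.lower (PySem.Str.strip part)
      pvOptions.foldl (fun d kv =>
        if PySem.Str.isIn kv.1 part_clean then d.insert kv.2 true else d) d) result
  result.items

-- ===== PORT B =====
def pvHit (low : String) (keywords : List String) : Bool :=
  keywords.any (fun k => PySem.Str.isIn k low)

def parse_bed_configurations_alt (value : String) : List (String × Bool) :=
  let low := PySem.Str.lower value
  [("single", pvHit low ["single"]),
   ("double", pvHit low ["double"]),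
   ("twin", pvHit low ["twin"]),
   ("triple", pvHit low ["triple"]),
   ("quad", pvHit low ["quad"]),
   ("bunkBed", pvHit low ["bunk bed", "bunkbed"]),
   ("cabin", pvHit low ["cabin"])]

-- ===== PRECONDITION & SPEC =====
def Spec_parse_bed_configurations (value : String) (out : List (String × Bool)) : Prop := out = parse_bed_configurations_alt value
instance (value : String) (out : List (String × Bool)) : Decidable (Spec_parse_bed_configurations value out) := by unfold Spec_parse_bed_configurations; infer_instance

-- ===== CLAIM (what is proved, stated in full; the proofs are below) =====
def Claim_equal_parse_bed_configurations : Prop := ∀ (value : String), Dom_parse_bed_configurations value → Spec_parse_bed_configurations value (parse_bed_configurations value)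

-- ===== LEMMAS AND PROOFS =====

-- the dict state of A's loops: seven fixed keys in insertion order
def pvMkD (b1 b2 b3 b4 b5 b6 b7 : Bool) : PySem.Dict String Bool :=
  PySem.Dict.mk [("single", b1), ("double", b2), ("twin", b3), ("triple", b4),
                 ("quad", b5), ("bunkBed", b6), ("cabin", b7)]

-- structural recursion computing Chars.splitOn s [','] (the fuel-free shape of the split)
def pvSplitC : List Char → List (List Char)
  | [] => [[]]
  | a :: rest => if a = ',' then [] :: pvSplitC rest else (pvSplitC rest).modifyHead (a :: ·)

lemma pvSplitC_cons_ex (l : List Char) : ∃ h t, pvSplitC l = h :: t := by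
  induction l with
  | nil => exact ⟨[], [], rfl⟩
  | cons a rest ih =>
    obtain ⟨h, t, heq⟩ := ih
    by_cases ha : a = ','
    · exact ⟨[], pvSplitC rest, by simp [pvSplitC, ha]⟩
    · exact ⟨a :: h, t, by simp [pvSplitC, ha, heq]⟩

lemma splitOn_go_eq (fuel : Nat) :
    ∀ (l cur : List Char) (acc : List (List Char)), l.length < fuel →
      PySem.Chars.splitOn.go [','] fuel l cur acc
        = acc.reverse ++ (pvSplitC l).modifyHead (cur.reverse ++ ·) := by
  induction fuel with
  | zero => intro l cur acc h; omega
  | succ f ih =>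
    intro l cur acc h
    cases l with
    | nil =>
      simp [PySem.Chars.splitOn.go, pvSplitC]
    | cons a rest =>
      by_cases ha : a = ','
      · subst ha
        have : PySem.Chars.splitOn.go [','] (f+1) (',' :: rest) cur acc
            = PySem.Chars.splitOn.go [','] f rest [] (cur.reverse :: acc) := by
          simp [PySem.Chars.splitOn.go, List.isPrefixOf]
        rw [this, ih rest [] (cur.reverse :: acc) (by simpa using Nat.lt_of_succ_lt_succ h)]
        obtain ⟨hh, tt, heq⟩ := pvSplitC_cons_ex rest
        simp [pvSplitC, heq]
      · have : PySem.Chars.splitOn.go [','] (f+1) (a :: rest) cur acc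
            = PySem.Chars.splitOn.go [','] f rest (a :: cur) acc := by
          simp [PySem.Chars.splitOn.go, List.isPrefixOf, Ne.symm ha]
        rw [this, ih rest (a :: cur) acc (by simpa using Nat.lt_of_succ_lt_succ h)]
        obtain ⟨hh, tt, heq⟩ := pvSplitC_cons_ex rest
        simp [pvSplitC, ha, heq]

lemma splitOn_comma (s : List Char) : PySem.Chars.splitOn s [','] = pvSplitC s := by
  have := splitOn_go_eq (s.length + 1) s [] [] (by omega)
  obtain ⟨hh, tt, heq⟩ := pvSplitC_cons_ex s
  simpa [PySem.Chars.splitOn, heq] using this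

-- each piece of the split is an infix of the string; the first one is a prefix
lemma pvSplitC_parts (s : List Char) :
    ∃ h t, pvSplitC s = h :: t ∧ h <+: s ∧ ∀ p ∈ t, p <:+: s := by
  induction s with
  | nil => exact ⟨[], [], rfl, List.nil_prefix, by simp⟩
  | cons a rest ih =>
    obtain ⟨h, t, heq, hp, ht⟩ := ih
    by_cases ha : a = ','
    · refine ⟨[], pvSplitC rest, by simp [pvSplitC, ha], List.nil_prefix, ?_⟩
      intro p hm
      rw [heq] at hm
      rcases List.mem_cons.mp hm with hm | hm
      · subst hm
        exact (hp.isInfix).trans (List.infix_cons_iff.mpr (Or.inr (List.infix_refl rest)))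
      · exact (ht p hm).trans (List.infix_cons_iff.mpr (Or.inr (List.infix_refl rest)))
    · refine ⟨a :: h, t, by simp [pvSplitC, ha, heq], by simpa using hp, ?_⟩
      intro p hm
      exact (ht p hm).trans (List.infix_cons_iff.mpr (Or.inr (List.infix_refl rest)))

lemma mem_pvSplitC_infix {s p : List Char} (hm : p ∈ pvSplitC s) : p <:+: s := by
  obtain ⟨h, t, heq, hp, ht⟩ := pvSplitC_parts s
  rw [heq] at hm
  rcases List.mem_cons.mp hm with hm | hm
  · subst hm; exact hp.isInfix
  · exact ht p hm

-- a comma-free prefix of s is a prefix of the first split piece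
lemma prefix_head_of_prefix :
    ∀ (s sub h : List Char) (t : List (List Char)), pvSplitC s = h :: t →
      sub <+: s → (',' : Char) ∉ sub → sub <+: h := by
  intro s
  induction s with
  | nil =>
    intro sub h t heq hp _
    simp [pvSplitC] at heq
    obtain ⟨h1, -⟩ := heq
    have h2 := List.prefix_nil.mp hp
    subst h2
    exact List.nil_prefix
  | cons a rest ih =>
    intro sub h t heq hp hc
    by_cases ha : a = ','
    · subst ha
      simp [pvSplitC] at heq
      cases sub with
      | nil => simp [← heq.1]
      | cons b sb =>
        exfalso
        have hb : b = ',' := (List.cons_prefix_cons.mp hp).1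
        exact hc (by simp [hb])
    · obtain ⟨h', t', heq'⟩ := pvSplitC_cons_ex rest
      rw [pvSplitC, if_neg ha, heq'] at heq
      simp at heq
      cases sub with
      | nil => simp
      | cons b sb =>
        obtain ⟨hb, hsb⟩ := List.cons_prefix_cons.mp hp
        have : sb <+: h' := ih sb h' t' heq' hsb (fun hmem => hc (by simp [hmem]))
        rw [← heq.1]
        exact List.cons_prefix_cons.mpr ⟨hb, this⟩

-- a comma-free infix of s is an infix of one of the split pieces
lemma exists_part_of_infix :
    ∀ (s sub : List Char), (',' : Char) ∉ sub → sub <:+: s →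
      ∃ p ∈ pvSplitC s, sub <:+: p := by
  intro s
  induction s with
  | nil =>
    intro sub _ hinf
    exact ⟨[], by simp [pvSplitC], by simpa using List.infix_nil.mp hinf⟩
  | cons a rest ih =>
    intro sub hc hinf
    rcases List.infix_cons_iff.mp hinf with hpre | hinf'
    · obtain ⟨h, t, heq⟩ := pvSplitC_cons_ex (a :: rest)
      refine ⟨h, by simp [heq], ?_⟩
      exact (prefix_head_of_prefix (a :: rest) sub h t heq hpre hc).isInfix
    · obtain ⟨p, hmem, hinfp⟩ := ih sub hc hinf'
      by_cases ha : a = ','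
      · exact ⟨p, by simp [pvSplitC, ha, hmem], hinfp⟩
      · obtain ⟨h', t', heq'⟩ := pvSplitC_cons_ex rest
        rw [heq'] at hmem
        rcases List.mem_cons.mp hmem with hmem | hmem
        · refine ⟨a :: h', by simp [pvSplitC, ha, heq'], ?_⟩
          subst hmem
          exact hinfp.trans (List.infix_cons_iff.mpr (Or.inr (List.infix_refl _)))
        · exact ⟨p, by simp [pvSplitC, ha, heq', hmem], hinfp⟩

-- an infix whose first element survives p survives dropWhile p
lemma infix_dropWhile_of_head {p : Char → Bool} (sub : List Char) (hne : sub ≠ [])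
    (hh : ∀ c, sub.head? = some c → p c = false) :
    ∀ q : List Char, sub <:+: q → sub <:+: q.dropWhile p := by
  intro q
  induction q with
  | nil => intro h; simpa using h
  | cons a rest ih =>
    intro hinf
    by_cases hp : p a = true
    · rw [List.dropWhile_cons_of_pos hp]
      rcases List.infix_cons_iff.mp hinf with hpre | h'
      · exfalso
        cases sub with
        | nil => exact hne rfl
        | cons b sb =>
          have hb : b = a := (List.cons_prefix_cons.mp hpre).1
          have hfa := hh b (by simp)
          rw [hb] at hfa
          rw [hfa] at hp
          exact Bool.false_ne_true hp
      · exact ih h'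
    · rwa [List.dropWhile_cons_of_neg hp]

lemma infix_strip (sub : List Char) (hne : sub ≠ [])
    (hh : ∀ c, sub.head? = some c → PySem.Chars.isspace c = false)
    (hl : ∀ c, sub.getLast? = some c → PySem.Chars.isspace c = false)
    (q : List Char) (hinf : sub <:+: q) : sub <:+: PySem.Chars.strip q := by
  have h1 : sub <:+: PySem.Chars.lstrip q :=
    infix_dropWhile_of_head sub hne hh q hinf
  have h2 : sub.reverse <:+: (PySem.Chars.lstrip q).reverse :=
    List.reverse_infix.mpr h1
  have hner : sub.reverse ≠ [] := by simpa using hne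
  have hhr : ∀ c, sub.reverse.head? = some c → PySem.Chars.isspace c = false := by
    intro c hc
    exact hl c (by rwa [List.getLast?_eq_head?_reverse])
  have h3 : sub.reverse <:+: ((PySem.Chars.lstrip q).reverse).dropWhile PySem.Chars.isspace :=
    infix_dropWhile_of_head sub.reverse hner hhr _ h2
  have h4 : sub <:+: (((PySem.Chars.lstrip q).reverse).dropWhile PySem.Chars.isspace).reverse := by
    rw [← List.reverse_infix]
    simpa using h3
  simpa [PySem.Chars.strip, PySem.Chars.rstrip] using h4

lemma strip_infix_self (q : List Char) : PySem.Chars.strip q <:+: q := by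
  have h1 : PySem.Chars.lstrip q <:+ q := List.dropWhile_suffix _
  have h2 : PySem.Chars.rstrip (PySem.Chars.lstrip q) <+: PySem.Chars.lstrip q := by
    have := List.dropWhile_suffix (l := (PySem.Chars.lstrip q).reverse) PySem.Chars.isspace
    unfold PySem.Chars.rstrip
    rw [← List.reverse_suffix]
    simpa using this
  exact (h2.isInfix).trans h1.isInfix

-- character facts: lowercasing never creates or destroys whitespace or a comma
lemma isspace_false_mid (c : Char) (h1 : 33 ≤ c.toNat) (h2 : c.toNat ≤ 132) :
    PySem.Chars.isspace c = false := by
  unfold PySem.Chars.isspace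
  simp only [Bool.or_eq_false_iff, Bool.and_eq_false_iff, decide_eq_false_iff_not]
  omega

lemma isspace_lowerChar (c : Char) :
    PySem.Chars.isspace (PySem.Chars.lowerChar c) = PySem.Chars.isspace c := by
  unfold PySem.Chars.lowerChar
  by_cases h : PySem.Chars.isupper c = true
  · rw [if_pos h]
    unfold PySem.Chars.isupper at h
    simp only [Bool.and_eq_true, decide_eq_true_eq, Char.le_def] at h
    have hlo : 65 ≤ c.toNat := Nat.succ_le_of_lt h.1
    have hhi : c.toNat ≤ 90 := Fin.mk_le_mk.mp h.2
    have hv : (Char.ofNat (c.toNat + 32)).toNat = c.toNat + 32 := by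
      have hval : Nat.isValidChar (c.toNat + 32) := Or.inl (by omega)
      rw [Char.toNat_ofNat, if_pos hval]
    rw [isspace_false_mid _ (by omega) (by omega),
        isspace_false_mid c (by omega) (by omega)]
  · rw [if_neg h]

lemma lowerChar_eq_comma_iff (c : Char) : PySem.Chars.lowerChar c = ',' ↔ c = ',' := by
  unfold PySem.Chars.lowerChar
  by_cases h : PySem.Chars.isupper c = true
  · rw [if_pos h]
    unfold PySem.Chars.isupper at h
    simp only [Bool.and_eq_true, decide_eq_true_eq, Char.le_def] at h
    have hlo : 65 ≤ c.toNat := Nat.succ_le_of_lt h.1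
    have hhi : c.toNat ≤ 90 := Fin.mk_le_mk.mp h.2
    have hv : (Char.ofNat (c.toNat + 32)).toNat = c.toNat + 32 := by
      have hval : Nat.isValidChar (c.toNat + 32) := Or.inl (by omega)
      rw [Char.toNat_ofNat, if_pos hval]
    constructor
    · intro he
      exfalso
      have : (Char.ofNat (c.toNat + 32)).toNat = (',' : Char).toNat := by rw [he]
      rw [hv] at this
      have : c.toNat + 32 = 44 := this
      omega
    · intro he
      exfalso
      have hc44 : c.toNat = 44 := by rw [he]; rfl
      omega
  · rw [if_neg h]

lemma lower_strip_comm (q : List Char) :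
    PySem.Chars.lower (PySem.Chars.strip q) = PySem.Chars.strip (PySem.Chars.lower q) := by
  have hps : (PySem.Chars.isspace ∘ PySem.Chars.lowerChar) = PySem.Chars.isspace := by
    funext c; exact isspace_lowerChar c
  unfold PySem.Chars.strip PySem.Chars.rstrip PySem.Chars.lstrip PySem.Chars.lower
  simp [List.dropWhile_map, hps, ← List.map_reverse]

lemma pvSplitC_lower (s : List Char) :
    pvSplitC (PySem.Chars.lower s) = (pvSplitC s).map PySem.Chars.lower := by
  induction s with
  | nil => simp [PySem.Chars.lower, pvSplitC]
  | cons a rest ih =>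
    have hstep : PySem.Chars.lower (a :: rest) = PySem.Chars.lowerChar a :: PySem.Chars.lower rest := by
      simp [PySem.Chars.lower]
    rw [hstep]
    by_cases ha : a = ','
    · subst ha
      rw [show PySem.Chars.lowerChar ',' = ',' from by decide]
      simp only [pvSplitC, reduceIte, List.map_cons]
      rw [ih]
      simp [PySem.Chars.lower]
    · have hla : PySem.Chars.lowerChar a ≠ ',' := fun he => ha ((lowerChar_eq_comma_iff a).mp he)
      obtain ⟨h, t, heq⟩ := pvSplitC_cons_ex rest
      simp only [pvSplitC, if_neg hla, if_neg ha, heq, ih, List.map_cons, List.modifyHead_cons]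
      simp [PySem.Chars.lower]

-- the heart: per-part membership after strip/lower equals whole-string membership after lower,
-- for a nonempty comma-free keyword with non-whitespace endpoints
theorem any_parts_eq (K : List Char) (hne : K ≠ []) (hcomma : (',' : Char) ∉ K)
    (hh : ∀ c, K.head? = some c → PySem.Chars.isspace c = false)
    (hl : ∀ c, K.getLast? = some c → PySem.Chars.isspace c = false)
    (S : List Char) :
    (pvSplitC S).any (fun p => PySem.Chars.isIn K (PySem.Chars.lower (PySem.Chars.strip p)))
      = PySem.Chars.isIn K (PySem.Chars.lower S) := by
  rw [Bool.eq_iff_iff]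
  simp only [List.any_eq_true, PySem.Chars.isIn_iff_infix]
  constructor
  · rintro ⟨p, hmem, hinf⟩
    rw [lower_strip_comm] at hinf
    have h1 : PySem.Chars.strip (PySem.Chars.lower p) <:+: PySem.Chars.lower p :=
      strip_infix_self _
    have h2 : PySem.Chars.lower p <:+: PySem.Chars.lower S := by
      have := mem_pvSplitC_infix hmem
      simpa [PySem.Chars.lower] using List.IsInfix.map PySem.Chars.lowerChar this
    exact (hinf.trans h1).trans h2
  · intro hinf
    obtain ⟨p', hmem', hinf'⟩ := exists_part_of_infix (PySem.Chars.lower S) K hcomma hinf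
    rw [pvSplitC_lower] at hmem'
    obtain ⟨p, hmem, rfl⟩ := List.mem_map.mp hmem'
    refine ⟨p, hmem, ?_⟩
    rw [lower_strip_comm]
    exact infix_strip K hne hh hl _ hinf'

-- ===== evaluation of A's dict loops =====

lemma ins1 (b1 b2 b3 b4 b5 b6 b7 t : Bool) :
    (if t then (pvMkD b1 b2 b3 b4 b5 b6 b7).insert "single" true else pvMkD b1 b2 b3 b4 b5 b6 b7)
      = pvMkD (b1 || t) b2 b3 b4 b5 b6 b7 := by
  cases t
  · simp
  · rw [Bool.or_true]; rfl

lemma ins2 (b1 b2 b3 b4 b5 b6 b7 t : Bool) :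
    (if t then (pvMkD b1 b2 b3 b4 b5 b6 b7).insert "double" true else pvMkD b1 b2 b3 b4 b5 b6 b7)
      = pvMkD b1 (b2 || t) b3 b4 b5 b6 b7 := by
  cases t
  · simp
  · rw [Bool.or_true]; rfl

lemma ins3 (b1 b2 b3 b4 b5 b6 b7 t : Bool) :
    (if t then (pvMkD b1 b2 b3 b4 b5 b6 b7).insert "twin" true else pvMkD b1 b2 b3 b4 b5 b6 b7)
      = pvMkD b1 b2 (b3 || t) b4 b5 b6 b7 := by
  cases t
  · simp
  · rw [Bool.or_true]; rfl

lemma ins4 (b1 b2 b3 b4 b5 b6 b7 t : Bool) :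
    (if t then (pvMkD b1 b2 b3 b4 b5 b6 b7).insert "triple" true else pvMkD b1 b2 b3 b4 b5 b6 b7)
      = pvMkD b1 b2 b3 (b4 || t) b5 b6 b7 := by
  cases t
  · simp
  · rw [Bool.or_true]; rfl

lemma ins5 (b1 b2 b3 b4 b5 b6 b7 t : Bool) :
    (if t then (pvMkD b1 b2 b3 b4 b5 b6 b7).insert "quad" true else pvMkD b1 b2 b3 b4 b5 b6 b7)
      = pvMkD b1 b2 b3 b4 (b5 || t) b6 b7 := by
  cases t
  · simp
  · rw [Bool.or_true]; rfl

lemma ins6 (b1 b2 b3 b4 b5 b6 b7 t : Bool) :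
    (if t then (pvMkD b1 b2 b3 b4 b5 b6 b7).insert "bunkBed" true else pvMkD b1 b2 b3 b4 b5 b6 b7)
      = pvMkD b1 b2 b3 b4 b5 (b6 || t) b7 := by
  cases t
  · simp
  · rw [Bool.or_true]; rfl

lemma ins7 (b1 b2 b3 b4 b5 b6 b7 t : Bool) :
    (if t then (pvMkD b1 b2 b3 b4 b5 b6 b7).insert "cabin" true else pvMkD b1 b2 b3 b4 b5 b6 b7)
      = pvMkD b1 b2 b3 b4 b5 b6 (b7 || t) := by
  cases t
  · simp
  · rw [Bool.or_true]; rfl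

lemma foldl_options (pc : String) (b1 b2 b3 b4 b5 b6 b7 : Bool) :
    pvOptions.foldl (fun d kv => if PySem.Str.isIn kv.1 pc then d.insert kv.2 true else d)
        (pvMkD b1 b2 b3 b4 b5 b6 b7)
      = pvMkD (b1 || PySem.Str.isIn "single" pc) (b2 || PySem.Str.isIn "double" pc)
          (b3 || PySem.Str.isIn "twin" pc) (b4 || PySem.Str.isIn "triple" pc)
          (b5 || PySem.Str.isIn "quad" pc)
          (b6 || PySem.Str.isIn "bunk bed" pc || PySem.Str.isIn "bunkbed" pc)
          (b7 || PySem.Str.isIn "cabin" pc) := by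
  simp only [pvOptions, List.foldl_cons, List.foldl_nil]
  rw [ins1, ins2, ins3, ins4, ins5, ins6, ins6, ins7]

-- A's per-part test
def pvT (k part : String) : Bool := PySem.Str.isIn k (PySem.Str.lower (PySem.Str.strip part))

lemma foldl_parts (parts : List String) :
    ∀ b1 b2 b3 b4 b5 b6 b7 : Bool,
    parts.foldl (fun d part =>
        let part_clean := PySem.Str.lower (PySem.Str.strip part)
        pvOptions.foldl (fun d kv =>
          if PySem.Str.isIn kv.1 part_clean then d.insert kv.2 true else d) d)
        (pvMkD b1 b2 b3 b4 b5 b6 b7)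
      = pvMkD (b1 || parts.any (pvT "single")) (b2 || parts.any (pvT "double"))
          (b3 || parts.any (pvT "twin")) (b4 || parts.any (pvT "triple"))
          (b5 || parts.any (pvT "quad"))
          (b6 || parts.any (pvT "bunk bed") || parts.any (pvT "bunkbed"))
          (b7 || parts.any (pvT "cabin")) := by
  induction parts with
  | nil => intro b1 b2 b3 b4 b5 b6 b7; simp
  | cons p ps ih =>
    intro b1 b2 b3 b4 b5 b6 b7
    rw [List.foldl_cons]
    show ps.foldl _ (pvOptions.foldl
        (fun d kv => if PySem.Str.isIn kv.1 (PySem.Str.lower (PySem.Str.strip p)) then d.insert kv.2 true else d)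
        (pvMkD b1 b2 b3 b4 b5 b6 b7)) = _
    rw [foldl_options, ih]
    simp only [pvMkD, PySem.Dict.mk.injEq, List.cons.injEq, Prod.mk.injEq, true_and, and_true]
    refine ⟨?_, ?_, ?_, ?_, ?_, ?_, ?_⟩ <;>
      simp only [List.any_cons, pvT, Bool.or_assoc, Bool.or_comm, Bool.or_left_comm]

-- A evaluated to its seven flags
lemma parseA_eval (value : String) :
    parse_bed_configurations value
      = [("single", ((PySem.Str.split? value ",").getD []).any (pvT "single")),
         ("double", ((PySem.Str.split? value ",").getD []).any (pvT "double")),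
         ("twin", ((PySem.Str.split? value ",").getD []).any (pvT "twin")),
         ("triple", ((PySem.Str.split? value ",").getD []).any (pvT "triple")),
         ("quad", ((PySem.Str.split? value ",").getD []).any (pvT "quad")),
         ("bunkBed", ((PySem.Str.split? value ",").getD []).any (pvT "bunk bed")
            || ((PySem.Str.split? value ",").getD []).any (pvT "bunkbed")),
         ("cabin", ((PySem.Str.split? value ",").getD []).any (pvT "cabin"))] := by
  have h : parse_bed_configurations value
      = (((PySem.Str.split? value ",").getD []).foldl (fun d part =>
          let part_clean := PySem.Str.lower (PySem.Str.strip part)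
          pvOptions.foldl (fun d kv =>
            if PySem.Str.isIn kv.1 part_clean then d.insert kv.2 true else d) d)
          (pvMkD false false false false false false false)).items := rfl
  rw [h, foldl_parts]
  simp [pvMkD]

-- per-keyword bridge from A's split-based any to B's whole-string test
lemma bridge (k : String) (K : List Char) (hk : k.toList = K) (hneK : K ≠ [])
    (hcommaK : (',' : Char) ∉ K)
    (hhK : K.head?.all (fun c => !PySem.Chars.isspace c) = true)
    (hlK : K.getLast?.all (fun c => !PySem.Chars.isspace c) = true)
    (value : String) :
    ((PySem.Str.split? value ",").getD []).any (pvT k) = PySem.Str.isIn k (PySem.Str.lower value) := by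
  have hne : k.toList ≠ [] := by rw [hk]; exact hneK
  have hcomma : (',' : Char) ∉ k.toList := by rw [hk]; exact hcommaK
  have hh : ∀ c, k.toList.head? = some c → PySem.Chars.isspace c = false := by
    intro c hc
    rw [hk] at hc
    rw [hc] at hhK
    simpa using hhK
  have hl : ∀ c, k.toList.getLast? = some c → PySem.Chars.isspace c = false := by
    intro c hc
    rw [hk] at hc
    rw [hc] at hlK
    simpa using hlK
  have hsplit : (PySem.Str.split? value ",").getD []
      = (pvSplitC value.toList).map String.ofList := by
    unfold PySem.Str.split?
    rw [PySem.Chars.split?]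
    simp [splitOn_comma]
  rw [hsplit, List.any_map]
  have hcongr : ((fun part => pvT k part) ∘ String.ofList)
      = fun p => PySem.Chars.isIn k.toList (PySem.Chars.lower (PySem.Chars.strip p)) := by
    funext p
    simp [pvT, PySem.Str.isIn_eq, PySem.Str.toList_lower, PySem.Str.toList_strip, String.toList_ofList]
  rw [hcongr]
  rw [any_parts_eq k.toList hne hcomma hh hl value.toList]
  simp [PySem.Str.isIn_eq, PySem.Str.toList_lower]

lemma main_eq (value : String) :
    parse_bed_configurations value = parse_bed_configurations_alt value := by
  rw [parseA_eval]
  rw [bridge "single" ['s','i','n','g','l','e'] (by decide) (by decide) (by decide) (by decide) (by decide),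
      bridge "double" ['d','o','u','b','l','e'] (by decide) (by decide) (by decide) (by decide) (by decide),
      bridge "twin" ['t','w','i','n'] (by decide) (by decide) (by decide) (by decide) (by decide),
      bridge "triple" ['t','r','i','p','l','e'] (by decide) (by decide) (by decide) (by decide) (by decide),
      bridge "quad" ['q','u','a','d'] (by decide) (by decide) (by decide) (by decide) (by decide),
      bridge "bunk bed" ['b','u','n','k',' ','b','e','d'] (by decide) (by decide) (by decide) (by decide) (by decide),
      bridge "bunkbed" ['b','u','n','k','b','e','d'] (by decide) (by decide) (by decide) (by decide) (by decide),
      bridge "cabin" ['c','a','b','i','n'] (by decide) (by decide) (by decide) (by decide) (by decide)]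
  simp [parse_bed_configurations_alt, pvHit]

-- ===== VERDICT (by name: the statement is the Claim_ definition above) =====
theorem parse_bed_configurations_spec : Claim_equal_parse_bed_configurations := by
  intro value _
  unfold Spec_parse_bed_configurations
  exact main_eq value
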